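-- pv_equiv track=rewrite | github.com/VladimirIvaniuk/learn-python-roadmap-platform | web/backend/main.py | _lesson_title
-- ===== SOURCE A (Python) =====
-- LESSONS_CONFIG = {
--     "01_basics": {
--         "name": "Основи Python",
--         "lessons": [
--             ("lesson_01_hello", "Урок 1 — Перша програма"),
--             ("lesson_02_types", "Урок 2 — Типи та операції"),
--             ("lesson_03_flow", "Урок 3 — Умови та цикли"),
--             ("lesson_04_functions", "Урок 4 — Функції"),
--         ],
--     },
--     "02_data_structures": {
--         "name": "Структури даних",
--         "lessons": [
--             ("lesson_01_lists", "Урок 1 — Списки"),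
--             ("lesson_02_dicts_sets", "Урок 2 — Словники та множини"),
--             ("lesson_03_comprehensions", "Урок 3 — Comprehensions"),
--         ],
--     },
--     "03_oop": {
--         "name": "ООП",
--         "lessons": [
--             ("lesson_01_classes", "Урок 1 — Класи та об'єкти"),
--             ("lesson_02_inheritance", "Урок 2 — Наслідування"),
--         ],
--     },
--     "04_files_errors": {
--         "name": "Файли та винятки",
--         "lessons": [
--             ("lesson_01_files", "Урок 1 — Робота з файлами"),
--             ("lesson_02_exceptions", "Урок 2 — Обробка помилок"),
--         ],
--     },
--     # Middle: один модуль, уроки в 02_middle/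
--     "02_middle": {
--         "name": "Middle",
--         "lessons": [
--             ("lesson_01_oop_advanced", "Урок 1 — Поглиблене ООП"),
--             ("lesson_02_async", "Урок 2 — Асинхронність"),
--             ("lesson_03_fastapi", "Урок 3 — FastAPI"),
--             ("lesson_04_databases", "Урок 4 — Бази даних"),
--             ("lesson_05_testing", "Урок 5 — Тестування"),
--             ("lesson_06_devops", "Урок 6 — DevOps"),
--         ],
--     },
--     # Senior: один модуль, уроки в 03_senior/
--     "03_senior": {
--         "name": "Senior",
--         "lessons": [
--             ("lesson_01_architecture", "Урок 1 — Архітектура"),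
--             ("lesson_02_design_patterns", "Урок 2 — Design Patterns"),
--             ("lesson_03_system_design", "Урок 3 — Системний дизайн"),
--             ("lesson_04_code_quality", "Урок 4 — Якість коду"),
--             ("lesson_05_security", "Урок 5 — Безпека"),
--             ("lesson_06_soft_skills", "Урок 6 — М'які навички"),
--         ],
--     },
-- }
--
-- LEVELS_CONFIG = {
--     "junior": {
--         "name": "Junior",
--         "modules": ["01_basics", "02_data_structures", "03_oop", "04_files_errors"],
--     },
--     "middle": {
--         "name": "Middle",
--         "modules": ["02_middle"],
--     },
--     "senior": {
--         "name": "Senior",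
--         "modules": ["03_senior"],
--     },
-- }
--
-- def _lesson_title(module_id: str, lesson_id: str) -> str:
--     for _lid, cfg in LEVELS_CONFIG.items():
--         for mid in cfg["modules"]:
--             if mid != module_id:
--                 continue
--             for lid, title in LESSONS_CONFIG[mid]["lessons"]:
--                 if lid == lesson_id:
--                     return title
--     return lesson_id
-- ===== SOURCE B (Python) =====
-- _TITLE_INDEX = {
--     ('01_basics', 'lesson_01_hello'): 'Урок 1 — Перша програма',
--     ('01_basics', 'lesson_02_types'): 'Урок 2 — Типи та операції',
--     ('01_basics', 'lesson_03_flow'): 'Урок 3 — Умови та цикли',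
--     ('01_basics', 'lesson_04_functions'): 'Урок 4 — Функції',
--     ('02_data_structures', 'lesson_01_lists'): 'Урок 1 — Списки',
--     ('02_data_structures', 'lesson_02_dicts_sets'): 'Урок 2 — Словники та множини',
--     ('02_data_structures', 'lesson_03_comprehensions'): 'Урок 3 — Comprehensions',
--     ('03_oop', 'lesson_01_classes'): "Урок 1 — Класи та об'єкти",
--     ('03_oop', 'lesson_02_inheritance'): 'Урок 2 — Наслідування',
--     ('04_files_errors', 'lesson_01_files'): 'Урок 1 — Робота з файлами',
--     ('04_files_errors', 'lesson_02_exceptions'): 'Урок 2 — Обробка помилок',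
--     ('02_middle', 'lesson_01_oop_advanced'): 'Урок 1 — Поглиблене ООП',
--     ('02_middle', 'lesson_02_async'): 'Урок 2 — Асинхронність',
--     ('02_middle', 'lesson_03_fastapi'): 'Урок 3 — FastAPI',
--     ('02_middle', 'lesson_04_databases'): 'Урок 4 — Бази даних',
--     ('02_middle', 'lesson_05_testing'): 'Урок 5 — Тестування',
--     ('02_middle', 'lesson_06_devops'): 'Урок 6 — DevOps',
--     ('03_senior', 'lesson_01_architecture'): 'Урок 1 — Архітектура',
--     ('03_senior', 'lesson_02_design_patterns'): 'Урок 2 — Design Patterns',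
--     ('03_senior', 'lesson_03_system_design'): 'Урок 3 — Системний дизайн',
--     ('03_senior', 'lesson_04_code_quality'): 'Урок 4 — Якість коду',
--     ('03_senior', 'lesson_05_security'): 'Урок 5 — Безпека',
--     ('03_senior', 'lesson_06_soft_skills'): "Урок 6 — М'які навички",
-- }
--
-- def _lesson_title(module_id: str, lesson_id: str) -> str:
--     return _TITLE_INDEX.get((module_id, lesson_id), lesson_id)
-- ===== Notes on version B (the rewrite author's own statement) =====
-- stated objective: simpler
-- what changed: Replaces the three nested scans over LEVELS_CONFIG/LESSONS_CONFIG by a single flat {(module_id, lesson_id): title} lookup table written out once, so the function body is one keyed .get with lesson_id as the default.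
import Mathlib
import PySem

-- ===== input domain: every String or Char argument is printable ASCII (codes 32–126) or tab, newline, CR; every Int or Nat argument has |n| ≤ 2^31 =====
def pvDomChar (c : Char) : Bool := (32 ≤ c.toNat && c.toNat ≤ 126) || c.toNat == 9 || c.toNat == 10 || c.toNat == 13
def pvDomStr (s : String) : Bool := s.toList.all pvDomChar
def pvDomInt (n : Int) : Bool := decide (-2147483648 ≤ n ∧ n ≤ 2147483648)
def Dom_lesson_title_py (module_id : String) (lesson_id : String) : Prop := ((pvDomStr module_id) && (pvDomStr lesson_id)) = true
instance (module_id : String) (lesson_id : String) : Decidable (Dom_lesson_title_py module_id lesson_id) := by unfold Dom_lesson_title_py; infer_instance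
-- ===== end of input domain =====

-- B replaces A's three nested scans over the level/lessons configs by one flat
-- (module_id, lesson_id) → title table and a single keyed lookup (objective: simpler).

-- ===== PORT A =====
-- Module-level data of A: LESSONS_CONFIG / LEVELS_CONFIG as insertion-ordered dicts;
-- each config value is (name, payload).
def pvLessonsConfig : PySem.Dict String (String × List (String × String)) := PySem.Dict.mk [
  ("01_basics", ("Основи Python", [
      ("lesson_01_hello", "Урок 1 — Перша програма"),
      ("lesson_02_types", "Урок 2 — Типи та операції"),
      ("lesson_03_flow", "Урок 3 — Умови та цикли"),
      ("lesson_04_functions", "Урок 4 — Функції")])),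
  ("02_data_structures", ("Структури даних", [
      ("lesson_01_lists", "Урок 1 — Списки"),
      ("lesson_02_dicts_sets", "Урок 2 — Словники та множини"),
      ("lesson_03_comprehensions", "Урок 3 — Comprehensions")])),
  ("03_oop", ("ООП", [
      ("lesson_01_classes", "Урок 1 — Класи та об'єкти"),
      ("lesson_02_inheritance", "Урок 2 — Наслідування")])),
  ("04_files_errors", ("Файли та винятки", [
      ("lesson_01_files", "Урок 1 — Робота з файлами"),
      ("lesson_02_exceptions", "Урок 2 — Обробка помилок")])),
  ("02_middle", ("Middle", [
      ("lesson_01_oop_advanced", "Урок 1 — Поглиблене ООП"),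
      ("lesson_02_async", "Урок 2 — Асинхронність"),
      ("lesson_03_fastapi", "Урок 3 — FastAPI"),
      ("lesson_04_databases", "Урок 4 — Бази даних"),
      ("lesson_05_testing", "Урок 5 — Тестування"),
      ("lesson_06_devops", "Урок 6 — DevOps")])),
  ("03_senior", ("Senior", [
      ("lesson_01_architecture", "Урок 1 — Архітектура"),
      ("lesson_02_design_patterns", "Урок 2 — Design Patterns"),
      ("lesson_03_system_design", "Урок 3 — Системний дизайн"),
      ("lesson_04_code_quality", "Урок 4 — Якість коду"),
      ("lesson_05_security", "Урок 5 — Безпека"),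
      ("lesson_06_soft_skills", "Урок 6 — М'які навички")]))]

def pvLevelsConfig : PySem.Dict String (String × List String) := PySem.Dict.mk [
  ("junior", ("Junior", ["01_basics", "02_data_structures", "03_oop", "04_files_errors"])),
  ("middle", ("Middle", ["02_middle"])),
  ("senior", ("Senior", ["03_senior"]))]

-- LESSONS_CONFIG[mid]["lessons"]; the .getD [] arm is unreachable for the mids A scans (all present).
def pvLessonsOf (mid : String) : List (String × String) :=
  ((pvLessonsConfig.get? mid).map (·.2)).getD []

-- inner loop: for lid, title in LESSONS_CONFIG[mid]["lessons"]: if lid == lesson_id: return title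
def pvFindLesson (lesson_id : String) : List (String × String) → Option String
  | [] => none
  | (lid, title) :: rest =>
      if lid == lesson_id then some title else pvFindLesson lesson_id rest

-- middle loop: for mid in cfg["modules"]: if mid != module_id: continue; …
def pvScanMods (module_id lesson_id : String) : List String → Option String
  | [] => none
  | mid :: rest =>
      if mid != module_id then pvScanMods module_id lesson_id rest
      else match pvFindLesson lesson_id (pvLessonsOf mid) with
        | some t => some t
        | none => pvScanMods module_id lesson_id rest

-- outer loop: for _lid, cfg in LEVELS_CONFIG.items()
def pvScanLevels (module_id lesson_id : String) : List (String × (String × List String)) → Option String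
  | [] => none
  | (_, (_, mods)) :: rest =>
      match pvScanMods module_id lesson_id mods with
      | some t => some t
      | none => pvScanLevels module_id lesson_id rest

def lesson_title_py (module_id : String) (lesson_id : String) : String :=
  (pvScanLevels module_id lesson_id pvLevelsConfig.items).getD lesson_id

-- ===== PORT B =====
-- B's module-level data: the flat _TITLE_INDEX literal of Source B.
def pvTitleIndex : PySem.Dict (String × String) String := PySem.Dict.mk [
  (("01_basics", "lesson_01_hello"), "Урок 1 — Перша програма"),
  (("01_basics", "lesson_02_types"), "Урок 2 — Типи та операції"),
  (("01_basics", "lesson_03_flow"), "Урок 3 — Умови та цикли"),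
  (("01_basics", "lesson_04_functions"), "Урок 4 — Функції"),
  (("02_data_structures", "lesson_01_lists"), "Урок 1 — Списки"),
  (("02_data_structures", "lesson_02_dicts_sets"), "Урок 2 — Словники та множини"),
  (("02_data_structures", "lesson_03_comprehensions"), "Урок 3 — Comprehensions"),
  (("03_oop", "lesson_01_classes"), "Урок 1 — Класи та об'єкти"),
  (("03_oop", "lesson_02_inheritance"), "Урок 2 — Наслідування"),
  (("04_files_errors", "lesson_01_files"), "Урок 1 — Робота з файлами"),
  (("04_files_errors", "lesson_02_exceptions"), "Урок 2 — Обробка помилок"),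
  (("02_middle", "lesson_01_oop_advanced"), "Урок 1 — Поглиблене ООП"),
  (("02_middle", "lesson_02_async"), "Урок 2 — Асинхронність"),
  (("02_middle", "lesson_03_fastapi"), "Урок 3 — FastAPI"),
  (("02_middle", "lesson_04_databases"), "Урок 4 — Бази даних"),
  (("02_middle", "lesson_05_testing"), "Урок 5 — Тестування"),
  (("02_middle", "lesson_06_devops"), "Урок 6 — DevOps"),
  (("03_senior", "lesson_01_architecture"), "Урок 1 — Архітектура"),
  (("03_senior", "lesson_02_design_patterns"), "Урок 2 — Design Patterns"),
  (("03_senior", "lesson_03_system_design"), "Урок 3 — Системний дизайн"),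
  (("03_senior", "lesson_04_code_quality"), "Урок 4 — Якість коду"),
  (("03_senior", "lesson_05_security"), "Урок 5 — Безпека"),
  (("03_senior", "lesson_06_soft_skills"), "Урок 6 — М'які навички"),
  ]

def lesson_title_py_alt (module_id : String) (lesson_id : String) : String :=
  (pvTitleIndex.get? (module_id, lesson_id)).getD lesson_id

-- ===== PRECONDITION & SPEC =====
def Spec_lesson_title_py (module_id : String) (lesson_id : String) (out : String) : Prop := out = lesson_title_py_alt module_id lesson_id
instance (module_id : String) (lesson_id : String) (out : String) : Decidable (Spec_lesson_title_py module_id lesson_id out) := by unfold Spec_lesson_title_py; infer_instance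

-- ===== CLAIM (what is proved, stated in full; the proofs are below) =====
def Claim_equal_lesson_title_py : Prop := ∀ (module_id : String) (lesson_id : String), Dom_lesson_title_py module_id lesson_id → Spec_lesson_title_py module_id lesson_id (lesson_title_py module_id lesson_id)

-- ===== LEMMAS AND PROOFS =====

-- ===== VERDICT (by name: the statement is the Claim_ definition above) =====
theorem lesson_title_py_spec : Claim_equal_lesson_title_py := by
  intro module_id lesson_id _
  unfold Spec_lesson_title_py
  by_cases h1 : module_id = "01_basics"
  · subst h1
    simp [lesson_title_py, lesson_title_py_alt, pvScanLevels, pvScanMods, pvFindLesson,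
          pvLessonsOf, pvLessonsConfig, pvLevelsConfig, pvTitleIndex, PySem.Dict.get?]
    split_ifs <;> simp_all
  by_cases h2 : module_id = "02_data_structures"
  · subst h2
    simp [lesson_title_py, lesson_title_py_alt, pvScanLevels, pvScanMods, pvFindLesson,
          pvLessonsOf, pvLessonsConfig, pvLevelsConfig, pvTitleIndex, PySem.Dict.get?]
    split_ifs <;> simp_all
  by_cases h3 : module_id = "03_oop"
  · subst h3
    simp [lesson_title_py, lesson_title_py_alt, pvScanLevels, pvScanMods, pvFindLesson,
          pvLessonsOf, pvLessonsConfig, pvLevelsConfig, pvTitleIndex, PySem.Dict.get?]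
    split_ifs <;> simp_all
  by_cases h4 : module_id = "04_files_errors"
  · subst h4
    simp [lesson_title_py, lesson_title_py_alt, pvScanLevels, pvScanMods, pvFindLesson,
          pvLessonsOf, pvLessonsConfig, pvLevelsConfig, pvTitleIndex, PySem.Dict.get?]
    split_ifs <;> simp_all
  by_cases h5 : module_id = "02_middle"
  · subst h5
    simp [lesson_title_py, lesson_title_py_alt, pvScanLevels, pvScanMods, pvFindLesson,
          pvLessonsOf, pvLessonsConfig, pvLevelsConfig, pvTitleIndex, PySem.Dict.get?]
    split_ifs <;> simp_all
  by_cases h6 : module_id = "03_senior"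
  · subst h6
    simp [lesson_title_py, lesson_title_py_alt, pvScanLevels, pvScanMods, pvFindLesson,
          pvLessonsOf, pvLessonsConfig, pvLevelsConfig, pvTitleIndex, PySem.Dict.get?]
    split_ifs <;> simp_all
  · simp [lesson_title_py, lesson_title_py_alt, pvScanLevels, pvScanMods,
          pvLevelsConfig, pvTitleIndex, PySem.Dict.get?,
          Ne.symm h1, Ne.symm h2, Ne.symm h3, Ne.symm h4, Ne.symm h5, Ne.symm h6]
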